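-- pv_equiv track=rewrite | github.com/simonfrygnegard/rovarsprak | rovare.py | rovare
-- ===== SOURCE A (Python) =====
-- def rovare(msg):
--     consonants = ["b", "c", "d", "f", "g", "h", "j", "k", "l", "m", "n", "p", "q", "r",
--                   "s", "t", "v", "w", "x", "z", "B", "C", "D", "F", "G", "H", "J", "K", "L", "M",
--                   "N", "P", "Q", "R", "S", "T", "V", "W", "X", "Z"]
--     outstring = ""
--     for char in msg:
--         if char in consonants:
--             outstring += char + "o" + char.lower()
--         else:
--             outstring += char
--
--     return outstring
-- ===== SOURCE B (Python) =====
-- def rovare(msg):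
--     # Staged rewriting: one global replace pass per consonant.
--     # All lowercase consonants first, then uppercase: the lowercase letters
--     # inserted by an uppercase pass ('B' -> 'Bob') are never re-encoded,
--     # and inserted 'o's are not consonants, so passes never interfere.
--     for c in "bcdfghjklmnpqrstvwxz":
--         msg = msg.replace(c, c + "o" + c)
--     for c in "BCDFGHJKLMNPQRSTVWXZ":
--         msg = msg.replace(c, c + "o" + c.lower())
--     return msg
-- ===== Notes on version B (the rewrite author's own statement) =====
-- stated objective: alternative
-- what changed: Replaces A's single per-character loop (membership test plus string appends) by 40 staged global str.replace passes, one per consonant, ordered lowercase-then-uppercase so inserted characters are never re-encoded.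
import Mathlib
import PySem

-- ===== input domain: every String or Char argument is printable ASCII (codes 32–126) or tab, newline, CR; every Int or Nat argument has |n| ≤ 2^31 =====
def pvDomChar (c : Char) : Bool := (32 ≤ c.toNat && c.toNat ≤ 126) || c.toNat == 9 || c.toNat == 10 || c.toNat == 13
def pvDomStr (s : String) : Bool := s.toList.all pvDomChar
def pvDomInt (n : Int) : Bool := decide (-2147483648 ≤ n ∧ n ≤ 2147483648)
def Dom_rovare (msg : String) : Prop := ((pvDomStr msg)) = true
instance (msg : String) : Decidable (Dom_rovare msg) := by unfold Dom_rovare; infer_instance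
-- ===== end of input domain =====

-- B replaces A's per-character loop by 40 staged global replace passes (one per consonant,
-- lowercase first so inserted characters are never re-encoded); objective: alternative.

-- ===== PORT A =====
def rovare (msg : String) : String :=
  let consonants : List Char :=
    ['b','c','d','f','g','h','j','k','l','m','n','p','q','r',
     's','t','v','w','x','z','B','C','D','F','G','H','J','K','L','M',
     'N','P','Q','R','S','T','V','W','X','Z']
  msg.toList.foldl (fun outstring char =>
    if char ∈ consonants then
      outstring ++ (String.ofList [char] ++ "o" ++ PySem.Str.lower (String.ofList [char]))
    else
      outstring ++ String.ofList [char]) ""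

-- ===== PORT B =====
def rovare_alt (msg : String) : String :=
  let m1 := "bcdfghjklmnpqrstvwxz".toList.foldl
    (fun m c => PySem.Str.replace m (String.ofList [c]) (String.ofList [c] ++ "o" ++ String.ofList [c])) msg
  "BCDFGHJKLMNPQRSTVWXZ".toList.foldl
    (fun m c => PySem.Str.replace m (String.ofList [c]) (String.ofList [c] ++ "o" ++ PySem.Str.lower (String.ofList [c]))) m1

-- ===== PRECONDITION & SPEC =====
def Spec_rovare (msg : String) (out : String) : Prop := out = rovare_alt msg
instance (msg : String) (out : String) : Decidable (Spec_rovare msg out) := by unfold Spec_rovare; infer_instance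

-- ===== CLAIM (what is proved, stated in full; the proofs are below) =====
def Claim_equal_rovare : Prop := ∀ (msg : String), Dom_rovare msg → Spec_rovare msg (rovare msg)

-- ===== LEMMAS AND PROOFS =====

-- single-character substitution performed by one replace pass
def pvSub1 (c : Char) (new : List Char) (x : Char) : List Char :=
  if x == c then new else [x]

theorem replace_go_single (c : Char) (new : List Char) :
    ∀ (fuel : Nat) (l acc : List Char), l.length ≤ fuel →
      PySem.Chars.replace.go [c] new fuel l acc
        = acc.reverse ++ l.flatMap (pvSub1 c new) := by
  intro fuel
  induction fuel with
  | zero =>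
    intro l acc h
    have : l = [] := List.length_eq_zero_iff.mp (Nat.le_zero.mp h)
    subst this
    simp [PySem.Chars.replace.go]
  | succ fuel ih =>
    intro l acc h
    cases l with
    | nil => simp [PySem.Chars.replace.go]
    | cons x t =>
      simp only [PySem.Chars.replace.go]
      by_cases hx : c = x
      · subst hx
        have hpre : List.isPrefixOf [c] (c :: t) = true := by
          simp [List.isPrefixOf]
        rw [if_pos hpre]
        have ht : t.length ≤ fuel := by
          simpa [Nat.succ_le_succ_iff] using h
        rw [show List.drop (List.length [c]) (c :: t) = t by simp]
        rw [ih t (new.reverse ++ acc) ht]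
        simp [pvSub1, List.flatMap_cons]
      · have hpre : List.isPrefixOf [c] (x :: t) = false := by
          simp [List.isPrefixOf, hx]
        rw [if_neg (by simp [hpre])]
        have ht : t.length ≤ fuel := by
          simpa [Nat.succ_le_succ_iff] using h
        rw [ih t (x :: acc) ht]
        have hxc : (x == c) = false := beq_eq_false_iff_ne.mpr (Ne.symm hx)
        simp [pvSub1, hxc, List.flatMap_cons]

theorem replace_single (c : Char) (new l : List Char) :
    PySem.Chars.replace l [c] new = l.flatMap (pvSub1 c new) := by
  unfold PySem.Chars.replace
  rw [if_neg (by simp)]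
  simpa using replace_go_single c new l.length l [] (le_refl _)

-- a fold of single-character replace passes, viewed on character lists
def pvMulti (cs : List Char) (enc : Char → List Char) (x : Char) : List Char :=
  match cs with
  | [] => [x]
  | c :: cs' => (pvSub1 c (enc c) x).flatMap (pvMulti cs' enc)

theorem foldl_replace_chars (enc : Char → List Char) :
    ∀ (cs : List Char) (l : List Char),
      cs.foldl (fun m c => PySem.Chars.replace m [c] (enc c)) l
        = l.flatMap (pvMulti cs enc) := by
  intro cs
  induction cs with
  | nil => intro l; simp [pvMulti]
  | cons c cs' ih =>
    intro l
    rw [List.foldl_cons, ih, replace_single, List.flatMap_assoc]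
    rfl

-- bridge the String-level fold in rovare_alt to the list-level fold
theorem foldl_replace_str (enc : Char → String) (cs : List Char) (s : String) :
    (cs.foldl (fun m c => PySem.Str.replace m (String.ofList [c]) (enc c)) s).toList
      = cs.foldl (fun m c => PySem.Chars.replace m [c] (enc c).toList) s.toList := by
  induction cs generalizing s with
  | nil => rfl
  | cons c cs' ih =>
    rw [List.foldl_cons, List.foldl_cons, ih, PySem.Str.toList_replace]
    simp

-- A's per-character encoding
def pvEncA (c : Char) : List Char :=
  if c ∈ ['b','c','d','f','g','h','j','k','l','m','n','p','q','r',
          's','t','v','w','x','z','B','C','D','F','G','H','J','K','L','M',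
          'N','P','Q','R','S','T','V','W','X','Z'] then
    c :: 'o' :: (PySem.Str.lower (String.ofList [c])).toList
  else [c]

-- B's combined per-character effect of all 40 passes
def pvEncB (x : Char) : List Char :=
  ((pvMulti "bcdfghjklmnpqrstvwxz".toList
      (fun c => c :: 'o' :: [c]) x).flatMap
    (pvMulti "BCDFGHJKLMNPQRSTVWXZ".toList
      (fun c => c :: 'o' :: (PySem.Str.lower (String.ofList [c])).toList)))

set_option maxRecDepth 4000 in
theorem encB_eq_encA_of_dom : ∀ (x : Char), pvDomChar x = true → pvEncB x = pvEncA x := by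
  have hall : ∀ n ∈ List.range 128, pvEncB (Char.ofNat n) = pvEncA (Char.ofNat n) := by decide
  intro x hx
  have hlt : x.toNat < 128 := by
    simp only [pvDomChar, Bool.or_eq_true, Bool.and_eq_true, decide_eq_true_eq, beq_iff_eq] at hx
    omega
  have hofs : Char.ofNat x.toNat = x := by
    apply Char.ext
    simp [Char.ofNat, Char.ofNatAux, Nat.isValidChar]
    rw [dif_pos]
    · rfl
    · exact Or.inl (by omega)
  have := hall x.toNat (List.mem_range.mpr hlt)
  rwa [hofs] at this

theorem foldl_strapp (l : List String) (a : String) :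
    l.foldl (fun r s => r ++ s) a = a ++ l.foldl (fun r s => r ++ s) "" := by
  induction l generalizing a with
  | nil => simp
  | cons s t ih =>
    rw [List.foldl_cons, List.foldl_cons, ih (a ++ s), ih (("" : String) ++ s)]
    simp [String.append_assoc]

theorem foldl_append_join (g : Char → String) (l : List Char) (acc : String) :
    l.foldl (fun out c => out ++ g c) acc = acc ++ String.join (l.map g) := by
  induction l generalizing acc with
  | nil => simp [String.join]
  | cons c t ih =>
    simp only [List.foldl, List.map_cons, String.join, ih]
    rw [foldl_strapp (List.map g t) (("" : String) ++ g c)]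
    simp [String.append_assoc]

theorem rovare_toList (msg : String) :
    (rovare msg).toList = msg.toList.flatMap pvEncA := by
  have h1 : rovare msg = msg.toList.foldl
      (fun (outstring : String) (char : Char) =>
        if char ∈ ['b','c','d','f','g','h','j','k','l','m','n','p','q','r',
            's','t','v','w','x','z','B','C','D','F','G','H','J','K','L','M',
            'N','P','Q','R','S','T','V','W','X','Z'] then
          outstring ++ (String.ofList [char] ++ "o" ++ PySem.Str.lower (String.ofList [char]))
        else outstring ++ String.ofList [char]) "" := rfl
  rw [h1]
  rw [show (fun (outstring : String) (char : Char) =>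
        if char ∈ ['b','c','d','f','g','h','j','k','l','m','n','p','q','r',
            's','t','v','w','x','z','B','C','D','F','G','H','J','K','L','M',
            'N','P','Q','R','S','T','V','W','X','Z'] then
          outstring ++ (String.ofList [char] ++ "o" ++ PySem.Str.lower (String.ofList [char]))
        else outstring ++ String.ofList [char])
      = fun outstring char => outstring ++ String.ofList (pvEncA char) from by
    funext out c
    unfold pvEncA
    split
    · apply String.toList_injective
      simp
    · apply String.toList_injective
      simp]
  rw [foldl_append_join (fun c => String.ofList (pvEncA c)) msg.toList ""]
  simp [String.toList_join, List.flatMap_def]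
  have hc : (String.toList ∘ fun c => String.ofList (pvEncA c)) = pvEncA := by
    funext c
    simp [Function.comp, String.toList_ofList]
  rw [hc]

theorem rovare_alt_toList (msg : String) :
    (rovare_alt msg).toList = msg.toList.flatMap pvEncB := by
  unfold rovare_alt
  simp only
  rw [foldl_replace_str, foldl_replace_str]
  rw [foldl_replace_chars, foldl_replace_chars, List.flatMap_assoc]
  rfl

-- ===== VERDICT (by name: the statement is the Claim_ definition above) =====
theorem rovare_spec : Claim_equal_rovare := by
  intro msg hdom
  unfold Spec_rovare
  apply String.toList_injective
  rw [rovare_toList, rovare_alt_toList]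
  refine List.flatMap_congr ?_
  intro x hx
  exact (encB_eq_encA_of_dom x (List.all_eq_true.mp hdom x hx)).symm
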